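-- pv_equiv track=rewrite | github.com/DarriEy/CONFLUENCE | utils/dataHandling_utils/attribute_processing_util.py | _clean_attribute_name
-- ===== SOURCE A (Python) =====
-- def _clean_attribute_name(name: str) -> str:
--     """
--     Clean a string to be usable as an attribute name.
--
--     Args:
--         name: Original string
--
--     Returns:
--         String usable as an attribute name
--     """
--     if not name:
--         return "unknown"
--
--     # Convert to string and strip whitespace
--     name_str = str(name).strip()
--     if not name_str:
--         return "unknown"
--
--     # Replace spaces and special characters
--     cleaned = name_str.lower()
--     cleaned = cleaned.replace(' ', '_')
--     cleaned = cleaned.replace('-', '_')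
--     cleaned = cleaned.replace('.', '_')
--     cleaned = cleaned.replace('(', '')
--     cleaned = cleaned.replace(')', '')
--     cleaned = cleaned.replace(',', '')
--     cleaned = cleaned.replace('/', '_')
--     cleaned = cleaned.replace('\\', '_')
--     cleaned = cleaned.replace('&', 'and')
--     cleaned = cleaned.replace('%', 'percent')
--
--     # Remove any remaining non-alphanumeric characters
--     cleaned = ''.join(c for c in cleaned if c.isalnum() or c == '_')
--
--     # Ensure it doesn't start with a number
--     if cleaned and cleaned[0].isdigit():
--         cleaned = 'x' + cleaned
--
--     # Limit length
--     if len(cleaned) > 50: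
--         cleaned = cleaned[:50]
--
--     # Handle empty result
--     if not cleaned:
--         return "unknown"
--
--     return cleaned
-- ===== SOURCE B (Python) =====
-- _REPL = {' ': '_', '-': '_', '.': '_', '/': '_', '\\': '_',
--          '(': '', ')': '', ',': '', '&': 'and', '%': 'percent'}
--
-- def _clean_attribute_name(name: str) -> str:
--     if not name:
--         return "unknown"
--     name_str = str(name).strip()
--     if not name_str:
--         return "unknown"
--     # one pass: replace each character and keep only alnum/_ of the replacement
--     out = []
--     for c in name_str.lower():
--         for r in _REPL.get(c, c):
--             if r.isalnum() or r == '_':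
--                 out.append(r)
--     cleaned = ''.join(out)
--     if cleaned and cleaned[0].isdigit():
--         cleaned = 'x' + cleaned
--     if len(cleaned) > 50:
--         cleaned = cleaned[:50]
--     if not cleaned:
--         return "unknown"
--     return cleaned
-- ===== Notes on version B (the rewrite author's own statement) =====
-- stated objective: alternative
-- what changed: Replaces A's ten sequential full-string .replace passes plus a separate filter pass with a single pass over the lowered string that maps each character through a replacement table and filters the replacement's characters on the fly.
import Mathlib
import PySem

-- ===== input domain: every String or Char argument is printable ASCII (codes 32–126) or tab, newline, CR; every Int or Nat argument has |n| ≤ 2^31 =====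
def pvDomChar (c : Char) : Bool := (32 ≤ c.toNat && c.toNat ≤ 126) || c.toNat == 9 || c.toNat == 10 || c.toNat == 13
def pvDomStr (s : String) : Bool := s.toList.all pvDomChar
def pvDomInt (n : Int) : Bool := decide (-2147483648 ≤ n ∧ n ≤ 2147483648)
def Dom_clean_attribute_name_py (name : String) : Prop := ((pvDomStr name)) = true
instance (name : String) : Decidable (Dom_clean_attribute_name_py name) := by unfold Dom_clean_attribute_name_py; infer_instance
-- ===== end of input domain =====

-- B replaces A's ten sequential full-string .replace passes (plus a separate filter pass)
-- with one pass over the lowered string through a replacement table, filtering on the fly;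
-- objective: alternative (same result, different decomposition).

-- ===== PORT A =====
-- the "if cleaned and cleaned[0].isdigit(): cleaned = 'x' + cleaned" tail, identical in both Pythons
def pvDigitPrefix (cleaned : List Char) : List Char :=
  match cleaned with
  | [] => cleaned
  | c :: _ => if PySem.Chars.isdigit c then 'x' :: cleaned else cleaned

def clean_attribute_name_py (name : String) : String :=
  if name.toList = [] then "unknown" else
  let name_str := PySem.Chars.strip name.toList
  if name_str = [] then "unknown" else
  let c0 := PySem.Chars.lower name_str
  let c1 := PySem.Chars.replace c0 [' '] ['_']
  let c2 := PySem.Chars.replace c1 ['-'] ['_']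
  let c3 := PySem.Chars.replace c2 ['.'] ['_']
  let c4 := PySem.Chars.replace c3 ['('] []
  let c5 := PySem.Chars.replace c4 [')'] []
  let c6 := PySem.Chars.replace c5 [','] []
  let c7 := PySem.Chars.replace c6 ['/'] ['_']
  let c8 := PySem.Chars.replace c7 ['\\'] ['_']
  let c9 := PySem.Chars.replace c8 ['&'] ['a','n','d']
  let c10 := PySem.Chars.replace c9 ['%'] ['p','e','r','c','e','n','t']
  let cleaned := c10.filter (fun c => PySem.Chars.isalnum c || c == '_')
  let cleaned2 := pvDigitPrefix cleaned
  let cleaned3 := if cleaned2.length > 50 then PySem.Chars.slice cleaned2 none (some 50) else cleaned2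
  if cleaned3 = [] then "unknown" else String.ofList cleaned3

-- ===== PORT B =====
-- the replacement dict _REPL of Source B
def pvRepl : PySem.Dict Char (List Char) :=
  PySem.Dict.mk [(' ', ['_']), ('-', ['_']), ('.', ['_']), ('/', ['_']), ('\\', ['_']),
                 ('(', []), (')', []), (',', []), ('&', ['a','n','d']),
                 ('%', ['p','e','r','c','e','n','t'])]

def clean_attribute_name_py_alt (name : String) : String :=
  if name.toList = [] then "unknown" else
  let name_str := PySem.Chars.strip name.toList
  if name_str = [] then "unknown" else
  -- one pass: for each lowered char, filter its replacement and append
  let cleaned := (PySem.Chars.lower name_str).flatMap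
      (fun c => (pvRepl.getD c [c]).filter (fun r => PySem.Chars.isalnum r || r == '_'))
  let cleaned2 := pvDigitPrefix cleaned
  let cleaned3 := if cleaned2.length > 50 then PySem.Chars.slice cleaned2 none (some 50) else cleaned2
  if cleaned3 = [] then "unknown" else String.ofList cleaned3

-- ===== PRECONDITION & SPEC =====
def Spec_clean_attribute_name_py (name : String) (out : String) : Prop := out = clean_attribute_name_py_alt name
instance (name : String) (out : String) : Decidable (Spec_clean_attribute_name_py name out) := by unfold Spec_clean_attribute_name_py; infer_instance

-- ===== CLAIM (what is proved, stated in full; the proofs are below) =====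
def Claim_equal_clean_attribute_name_py : Prop := ∀ (name : String), Dom_clean_attribute_name_py name → Spec_clean_attribute_name_py name (clean_attribute_name_py name)

-- ===== LEMMAS AND PROOFS =====

lemma go_single (a : Char) (new : List Char) :
    ∀ (fuel : Nat) (l acc : List Char), l.length ≤ fuel →
      PySem.Chars.replace.go [a] new fuel l acc
        = acc.reverse ++ l.flatMap (fun c => if c = a then new else [c]) := by
  intro fuel
  induction fuel with
  | zero => intro l acc h; cases l with
    | nil => simp [PySem.Chars.replace.go]
    | cons c t => simp at h
  | succ n ih =>
    intro l acc h
    cases l with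
    | nil => simp [PySem.Chars.replace.go]
    | cons c t =>
      by_cases hc : c = a
      · subst hc
        simp [PySem.Chars.replace.go, List.isPrefixOf, ih t _ (by simpa using h)]
      · simp [PySem.Chars.replace.go, List.isPrefixOf, hc, Ne.symm hc,
              ih t _ (by simpa using h)]

-- a .replace with a one-char pattern is a per-character substitution
lemma replace_single (a : Char) (new cs : List Char) :
    PySem.Chars.replace cs [a] new = cs.flatMap (fun c => if c = a then new else [c]) := by
  simp [PySem.Chars.replace, go_single a new cs.length cs [] le_rfl]

lemma filter_flatMap (l : List Char) (f : Char → List Char) (p : Char → Bool) :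
    (l.flatMap f).filter p = l.flatMap (fun x => (f x).filter p) := by
  induction l with
  | nil => rfl
  | cons c t ih => simp [List.flatMap_cons, List.filter_append, ih]

-- A's replace chain followed by the filter equals B's single-pass flatMap
lemma core (u : List Char) :
    (PySem.Chars.replace (PySem.Chars.replace (PySem.Chars.replace (PySem.Chars.replace
      (PySem.Chars.replace (PySem.Chars.replace (PySem.Chars.replace (PySem.Chars.replace
      (PySem.Chars.replace (PySem.Chars.replace u [' '] ['_']) ['-'] ['_']) ['.'] ['_'])
      ['('] []) [')'] []) [','] []) ['/'] ['_']) ['\\'] ['_']) ['&'] ['a','n','d'])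
      ['%'] ['p','e','r','c','e','n','t']).filter
        (fun c => PySem.Chars.isalnum c || c == '_')
    = u.flatMap (fun c => (pvRepl.getD c [c]).filter
        (fun r => PySem.Chars.isalnum r || r == '_')) := by
  simp only [replace_single, List.flatMap_assoc, filter_flatMap]
  congr 1
  funext c
  by_cases h1 : c = ' '; · subst h1; decide
  by_cases h2 : c = '-'; · subst h2; decide
  by_cases h3 : c = '.'; · subst h3; decide
  by_cases h4 : c = '('; · subst h4; decide
  by_cases h5 : c = ')'; · subst h5; decide
  by_cases h6 : c = ','; · subst h6; decide
  by_cases h7 : c = '/'; · subst h7; decide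
  by_cases h8 : c = '\\'; · subst h8; decide
  by_cases h9 : c = '&'; · subst h9; decide
  by_cases h10 : c = '%'; · subst h10; decide
  simp [h1, h2, h3, h4, h5, h6, h7, h8, h9, h10, pvRepl, PySem.Dict.getD,
        PySem.Dict.get?, Ne.symm h1, Ne.symm h2, Ne.symm h3, Ne.symm h4,
        Ne.symm h5, Ne.symm h6, Ne.symm h7, Ne.symm h8, Ne.symm h9, Ne.symm h10]

-- ===== VERDICT (by name: the statement is the Claim_ definition above) =====
theorem clean_attribute_name_py_spec : Claim_equal_clean_attribute_name_py := by
  intro name _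
  simp only [Spec_clean_attribute_name_py, clean_attribute_name_py,
             clean_attribute_name_py_alt, core]
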